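-- pv_equiv track=rewrite | github.com/marko999/kamere | src/patterns.py | _hours_to_range
-- ===== SOURCE A (Python) =====
-- def _hours_to_range(hours: list[int]) -> str | None:
--     """Convert a sorted list of hours into a human-readable range string.
--
--     Examples:
--         [10, 11, 12, 13, 14] -> "10:00 - 15:00"
--         [8, 9, 14, 15, 16] -> "08:00 - 10:00, 14:00 - 17:00"
--         [] -> None
--     """
--     if not hours:
--         return None
--
--     sorted_hours = sorted(hours)
--     ranges = []
--     start = sorted_hours[0]
--     prev = sorted_hours[0]
--
--     for h in sorted_hours[1:]:
--         if h == prev + 1: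
--             prev = h
--         else:
--             ranges.append((start, prev + 1))
--             start = h
--             prev = h
--     ranges.append((start, prev + 1))
--
--     parts = []
--     for s, e in ranges:
--         parts.append(f"{s:02d}:00 - {e:02d}:00")
--
--     return ", ".join(parts)
-- ===== SOURCE B (Python) =====
-- def _hours_to_range(hours):
--     if not hours:
--         return None
--     sh = sorted(hours)
--     cuts = [i for i in range(len(sh)) if i == 0 or sh[i] != sh[i - 1] + 1] + [len(sh)]
--     return ", ".join(f"{sh[a]:02d}:00 - {sh[b - 1] + 1:02d}:00" for a, b in zip(cuts, cuts[1:]))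
-- ===== Notes on version B (the rewrite author's own statement) =====
-- stated objective: alternative
-- what changed: Replaces A's start/prev accumulator state machine (building a list of (start,end) tuples, then a second formatting loop) with a staged breakpoint computation: one comprehension over indices collects every run-start index, zip pairs adjacent breakpoints, and each pair is formatted directly.
import Mathlib
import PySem

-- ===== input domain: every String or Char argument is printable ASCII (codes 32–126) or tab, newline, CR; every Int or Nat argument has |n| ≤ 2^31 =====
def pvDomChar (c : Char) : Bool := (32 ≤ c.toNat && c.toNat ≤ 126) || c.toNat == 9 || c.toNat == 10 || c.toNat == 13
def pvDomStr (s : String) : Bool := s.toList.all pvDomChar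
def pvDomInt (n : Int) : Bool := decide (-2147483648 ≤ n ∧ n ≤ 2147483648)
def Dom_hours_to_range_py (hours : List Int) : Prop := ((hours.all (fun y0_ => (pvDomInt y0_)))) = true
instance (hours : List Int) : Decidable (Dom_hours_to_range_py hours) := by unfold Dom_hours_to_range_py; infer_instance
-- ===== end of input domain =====

-- B replaces A's start/prev accumulator state machine (tuple list + second formatting pass) by a
-- staged breakpoint computation: a comprehension collecting run-start indices, zipped pairwise and
-- formatted directly; same cost, alternative structure.

-- shared helper: Python's f"{n:02d}" (both sources use the same format string)
def pvFmt02 (n : Int) : String :=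
  if 0 ≤ n ∧ n < 10 then "0" ++ PySem.Int.toStr n else PySem.Int.toStr n

-- A-side helper: f"{s:02d}:00 - {e:02d}:00"
def pvFmtRange (r : Int × Int) : String :=
  pvFmt02 r.1 ++ ":00 - " ++ pvFmt02 r.2 ++ ":00"

-- ===== PORT A =====
def hours_to_range_py (hours : List Int) : Option String :=
  if hours = [] then none
  else
    let sorted_hours := PySem.List.sorted hours (fun x => x) false
    match sorted_hours with
    | [] => none  -- unreachable totality guard: sorted of a nonempty list is nonempty
    | s0 :: rest =>
      -- ranges/start/prev state machine, then ranges.append((start, prev+1))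
      let st := rest.foldl
        (fun (acc : List (Int × Int) × Int × Int) h =>
          if h = acc.2.2 + 1 then (acc.1, acc.2.1, h)
          else (acc.1 ++ [(acc.2.1, acc.2.2 + 1)], h, h))
        ([], s0, s0)
      let ranges := st.1 ++ [(st.2.1, st.2.2 + 1)]
      some (PySem.Str.join ", " (ranges.map pvFmtRange))

-- ===== PORT B =====
-- the comprehension's condition: i == 0 or sh[i] != sh[i-1] + 1 (indices always in range)
def pvP (sh : List Int) (i : Nat) : Bool := (i == 0) || !(sh.getD i 0 == sh.getD (i - 1) 0 + 1)

-- f"{sh[a]:02d}:00 - {sh[b-1]+1:02d}:00"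
def pvFmtB (sh : List Int) (p : Nat × Nat) : String :=
  pvFmt02 (sh.getD p.1 0) ++ ":00 - " ++ pvFmt02 (sh.getD (p.2 - 1) 0 + 1) ++ ":00"

def hours_to_range_py_alt (hours : List Int) : Option String :=
  if hours = [] then none
  else
    let sh := PySem.List.sorted hours (fun x => x) false
    let cuts := ((List.range sh.length).filter (pvP sh)) ++ [sh.length]
    some (PySem.Str.join ", " ((cuts.zip cuts.tail).map (pvFmtB sh)))

-- ===== PRECONDITION & SPEC =====
def Spec_hours_to_range_py (hours : List Int) (out : Option String) : Prop := out = hours_to_range_py_alt hours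
instance (hours : List Int) (out : Option String) : Decidable (Spec_hours_to_range_py hours out) := by unfold Spec_hours_to_range_py; infer_instance

-- ===== CLAIM (what is proved, stated in full; the proofs are below) =====
def Claim_equal_hours_to_range_py : Prop := ∀ (hours : List Int), Dom_hours_to_range_py hours → Spec_hours_to_range_py hours (hours_to_range_py hours)

-- ===== LEMMAS AND PROOFS =====

-- common specification of the list of (start, end) ranges of a run-decomposition
def pvSpec (s p : Int) : List Int → List (Int × Int)
  | [] => [(s, p + 1)]
  | h :: t => if h = p + 1 then pvSpec s h t else (s, p + 1) :: pvSpec h h t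

-- A's fold produces exactly pvSpec
theorem pvFoldA (t : List Int) : ∀ (acc : List (Int × Int)) (s p : Int),
    (t.foldl
        (fun (acc : List (Int × Int) × Int × Int) h =>
          if h = acc.2.2 + 1 then (acc.1, acc.2.1, h)
          else (acc.1 ++ [(acc.2.1, acc.2.2 + 1)], h, h))
        (acc, s, p)).1 ++
      [((t.foldl
          (fun (acc : List (Int × Int) × Int × Int) h =>
            if h = acc.2.2 + 1 then (acc.1, acc.2.1, h)
            else (acc.1 ++ [(acc.2.1, acc.2.2 + 1)], h, h))
          (acc, s, p)).2.1,
        (t.foldl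
          (fun (acc : List (Int × Int) × Int × Int) h =>
            if h = acc.2.2 + 1 then (acc.1, acc.2.1, h)
            else (acc.1 ++ [(acc.2.1, acc.2.2 + 1)], h, h))
          (acc, s, p)).2.2 + 1)] = acc ++ pvSpec s p t := by
  induction t with
  | nil => intro acc s p; simp [pvSpec]
  | cons h t ih =>
    intro acc s p
    simp only [List.foldl_cons, pvSpec]
    by_cases hc : h = p + 1
    · simp [hc, ih]
    · simp [hc, ih, List.append_assoc]

-- proof-side helper: the end index of the maximal consecutive run starting at i
def pvAdvance (sh : List Int) (j : Nat) : Nat :=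
  if j + 1 < sh.length ∧ sh.getD (j + 1) 0 = sh.getD j 0 + 1 then pvAdvance sh (j + 1) else j
termination_by sh.length - j
decreasing_by omega

theorem pvAdvance_ge (sh : List Int) (j : Nat) : j ≤ pvAdvance sh j := by
  fun_induction pvAdvance sh j with
  | case1 j h ih => omega
  | case2 j h => omega

theorem pvAdvance_lt (sh : List Int) (i : Nat) (h : i < sh.length) : pvAdvance sh i < sh.length := by
  fun_induction pvAdvance sh i with
  | case1 j hc ih => exact ih (by omega)
  | case2 j hc => exact h

theorem pvAdvance_chain (sh : List Int) (i : Nat) :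
    ∀ k, i ≤ k → k < pvAdvance sh i → sh.getD (k + 1) 0 = sh.getD k 0 + 1 := by
  fun_induction pvAdvance sh i with
  | case1 j hc ih =>
    intro k hk1 hk2
    rcases Nat.eq_or_lt_of_le hk1 with rfl | hlt
    · exact hc.2
    · exact ih k (by omega) hk2
  | case2 j hc =>
    intro k hk1 hk2; omega

theorem pvAdvance_stop (sh : List Int) (i : Nat) :
    ¬ (pvAdvance sh i + 1 < sh.length ∧ sh.getD (pvAdvance sh i + 1) 0 = sh.getD (pvAdvance sh i) 0 + 1) := by
  fun_induction pvAdvance sh i with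
  | case1 j hc ih => exact ih
  | case2 j hc => exact hc

theorem pvDropCons (sh : List Int) (i : Nat) (h : i < sh.length) :
    sh.drop i = sh.getD i 0 :: sh.drop (i + 1) := by
  rw [List.getD_eq_getElem sh 0 h]
  exact (List.getElem_cons_drop h).symm

-- pvSpec of a run: peels off exactly one (start, end) pair per maximal run
theorem pvRunSpec (sh : List Int) : ∀ (d i j : Nat), j - i = d → i ≤ j → j < sh.length →
    (∀ k, i ≤ k → k < j → sh.getD (k + 1) 0 = sh.getD k 0 + 1) →
    (¬ (j + 1 < sh.length ∧ sh.getD (j + 1) 0 = sh.getD j 0 + 1)) →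
    ∀ s, pvSpec s (sh.getD i 0) (sh.drop (i + 1)) =
      (s, sh.getD j 0 + 1) ::
        (if j + 1 < sh.length then
           pvSpec (sh.getD (j + 1) 0) (sh.getD (j + 1) 0) (sh.drop (j + 1 + 1)) else []) := by
  intro d
  induction d with
  | zero =>
    intro i j hd hij hjn hchain hstop s
    have hij' : i = j := by omega
    subst hij'
    by_cases hn : i + 1 < sh.length
    · have hne : ¬ sh.getD (i + 1) 0 = sh.getD i 0 + 1 := fun he => hstop ⟨hn, he⟩
      rw [pvDropCons sh (i + 1) hn, if_pos hn]
      simp only [pvSpec]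
      rw [if_neg hne]
    · have hdrop : sh.drop (i + 1) = [] := List.drop_eq_nil_of_le (by omega)
      rw [hdrop, if_neg hn]
      simp only [pvSpec]
  | succ d ih =>
    intro i j hd hij hjn hchain hstop s
    have hi1 : i + 1 ≤ j := by omega
    have hin : i + 1 < sh.length := by omega
    have hstep : sh.getD (i + 1) 0 = sh.getD i 0 + 1 := hchain i (le_refl i) (by omega)
    rw [pvDropCons sh (i + 1) hin]
    simp only [pvSpec]
    rw [if_pos hstep]
    exact ih (i + 1) j (by omega) hi1 hjn (fun k hk1 hk2 => hchain k (by omega) hk2) hstop s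

-- inside a run, no index is a breakpoint, so the comprehension skips straight to the run's end
theorem pvFilter_skip (sh : List Int) (i j : Nat) (hij : i ≤ j) (hjn : j < sh.length)
    (hchain : ∀ k, i ≤ k → k < j → sh.getD (k + 1) 0 = sh.getD k 0 + 1) :
    (List.range' (i + 1) (sh.length - (i + 1))).filter (pvP sh) =
      (List.range' (j + 1) (sh.length - (j + 1))).filter (pvP sh) := by
  have hsplit : List.range' (i + 1) (j - i) ++ List.range' (j + 1) (sh.length - (j + 1)) =
      List.range' (i + 1) (sh.length - (i + 1)) := by
    have h1 : i + 1 + (j - i) = j + 1 := by omega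
    have h2 : (j - i) + (sh.length - (j + 1)) = sh.length - (i + 1) := by omega
    rw [← h2, ← List.range'_append_1, h1]
  rw [← hsplit, List.filter_append]
  have hnil : (List.range' (i + 1) (j - i)).filter (pvP sh) = [] := by
    rw [List.filter_eq_nil_iff]
    intro k hk
    rw [List.mem_range'_1] at hk
    have hkc : sh.getD k 0 = sh.getD (k - 1) 0 + 1 := by
      have := hchain (k - 1) (by omega) (by omega)
      have hk1 : k - 1 + 1 = k := by omega
      rwa [hk1] at this
    unfold pvP
    rw [hkc]
    simp
    omega
  rw [hnil, List.nil_append]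

-- B's zipped breakpoint pairs, formatted, equal pvSpec formatted
theorem pvCutsSpec (sh : List Int) : ∀ (d i : Nat), sh.length - i = d → i < sh.length →
    pvP sh i = true →
    (((((List.range' i (sh.length - i)).filter (pvP sh)) ++ [sh.length]).zip
        ((((List.range' i (sh.length - i)).filter (pvP sh)) ++ [sh.length]).tail)).map (pvFmtB sh))
      = (pvSpec (sh.getD i 0) (sh.getD i 0) (sh.drop (i + 1))).map pvFmtRange := by
  intro d
  induction d using Nat.strong_induction_on with
  | _ d ih =>
  intro i hd hi hpi
  have hge := pvAdvance_ge sh i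
  have hlt := pvAdvance_lt sh i hi
  have hchain := pvAdvance_chain sh i
  have hstop := pvAdvance_stop sh i
  rw [pvRunSpec sh (pvAdvance sh i - i) i (pvAdvance sh i) rfl hge hlt hchain hstop (sh.getD i 0)]
  have hcons : List.range' i (sh.length - i) = i :: List.range' (i + 1) (sh.length - (i + 1)) := by
    have h1 : sh.length - i = (sh.length - (i + 1)) + 1 := by omega
    rw [h1, List.range'_succ]
  rw [hcons, List.filter_cons_of_pos hpi,
      pvFilter_skip sh i (pvAdvance sh i) hge hlt hchain]
  by_cases hn : pvAdvance sh i + 1 < sh.length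
  · -- another run follows
    have hne : ¬ sh.getD (pvAdvance sh i + 1) 0 = sh.getD (pvAdvance sh i) 0 + 1 :=
      fun he => hstop ⟨hn, he⟩
    have hcons2 : List.range' (pvAdvance sh i + 1) (sh.length - (pvAdvance sh i + 1)) =
        (pvAdvance sh i + 1) :: List.range' (pvAdvance sh i + 2) (sh.length - (pvAdvance sh i + 2)) := by
      have h1 : sh.length - (pvAdvance sh i + 1) = (sh.length - (pvAdvance sh i + 2)) + 1 := by omega
      rw [h1, List.range'_succ]
    have hp2 : pvP sh (pvAdvance sh i + 1) = true := by
      unfold pvP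
      have h1 : pvAdvance sh i + 1 - 1 = pvAdvance sh i := rfl
      rw [h1]
      simp only [Bool.or_eq_true, Bool.not_eq_true', beq_eq_false_iff_ne, ne_eq]
      right; exact hne
    rw [if_pos hn]
    have hrec := ih (sh.length - (pvAdvance sh i + 1)) (by omega) (pvAdvance sh i + 1) rfl hn hp2
    rw [hcons2, List.filter_cons_of_pos hp2] at hrec ⊢
    simp only [List.cons_append, List.zip_cons_cons, List.tail_cons, List.map_cons] at hrec ⊢
    rw [hrec]
    refine congrArg₂ _ ?_ rfl
    simp [pvFmtB, pvFmtRange]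
  · -- the run reaches the end of the list
    have hend : pvAdvance sh i + 1 = sh.length := by omega
    have hnil : List.range' (pvAdvance sh i + 1) (sh.length - (pvAdvance sh i + 1)) = [] := by
      rw [hend]; simp
    rw [if_neg hn, hnil]
    simp only [List.filter_nil, List.nil_append, List.cons_append, List.nil_append,
      List.zip_cons_cons, List.tail_cons, List.zip_nil_right, List.map_cons, List.map_nil]
    refine congrArg₂ _ ?_ rfl
    have h1 : sh.length - 1 = pvAdvance sh i := by omega
    simp [pvFmtB, pvFmtRange, h1]

theorem hours_to_range_py_spec : Claim_equal_hours_to_range_py := by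
  unfold Claim_equal_hours_to_range_py Spec_hours_to_range_py
  intro hours _
  by_cases h : hours = []
  · simp [hours_to_range_py, hours_to_range_py_alt, h]
  · rcases hs : PySem.List.sorted hours (fun x => x) false with _ | ⟨s0, rest⟩
    · exact absurd ((PySem.List.sorted_eq_nil_iff hours (fun x => x) false).mp hs) h
    · have ha : hours_to_range_py hours =
          some (PySem.Str.join ", " ((pvSpec s0 s0 rest).map pvFmtRange)) := by
        simp only [hours_to_range_py, if_neg h, hs]
        rw [pvFoldA rest [] s0 s0, List.nil_append]
      have hlen : 0 < (PySem.List.sorted hours (fun x => x) false).length := by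
        rw [hs]; simp
      have hp0 : pvP (PySem.List.sorted hours (fun x => x) false) 0 = true := by
        simp [pvP]
      have hb : hours_to_range_py_alt hours =
          some (PySem.Str.join ", " ((pvSpec s0 s0 rest).map pvFmtRange)) := by
        simp only [hours_to_range_py_alt, if_neg h]
        rw [List.range_eq_range']
        have := pvCutsSpec (PySem.List.sorted hours (fun x => x) false)
          ((PySem.List.sorted hours (fun x => x) false).length - 0) 0 rfl hlen hp0
        rw [Nat.sub_zero] at this
        rw [this, hs]
        rfl
      rw [ha, hb]
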